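-- pv_equiv track=rewrite | github.com/cuishuting/Mental_Process_Inference_TLPP | metric.py | Compute_TQuest
-- ===== SOURCE A (Python) =====
-- def Compute_TQuest(seq1, seq2, threshold):
--     # Determine the lengths of the input sequences
--     len1 = len(seq1)
--     len2 = len(seq2)
--
--     # Initialize the count of threshold queries
--     tquest_count = 0
--
--     # Iterate over the shorter sequence using a sliding window
--     for i in range(len1):
--         # Determine the start and end indices of the window in sequence 2
--         start_index = max(0, i - len2 + 1)
--         end_index = min(i + 1, len2)
--
--         # Check if any element in the window satisfies the threshold condition
--         if any(abs(seq1[i] - seq2[j]) <= threshold for j in range(start_index, end_index)):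
--             tquest_count += 1
--
--     return round(tquest_count, 3)
-- ===== SOURCE B (Python) =====
-- import bisect
--
-- def Compute_TQuest(seq1, seq2, threshold):
--     # Sliding window over seq2 maintained as a sorted list; membership of a
--     # value within [v-threshold, v+threshold] answered by one bisect query.
--     len2 = len(seq2)
--     win = []
--     count = 0
--     for i in range(len(seq1)):
--         v = seq1[i]
--         if i < len2:
--             bisect.insort(win, seq2[i])
--         if len2 <= i and win:
--             del win[bisect.bisect_left(win, seq2[i - len2])]
--         lo = bisect.bisect_left(win, v - threshold)
--         if lo < len(win) and win[lo] <= v + threshold: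
--             count += 1
--     return count
-- ===== Notes on version B (the rewrite author's own statement) =====
-- stated objective: faster
-- what changed: A rescans the whole seq2 window with a generator for every index of seq1; B maintains the window incrementally as one sorted list (bisect.insort / del / bisect_left), answering each range-existence query with a single binary search instead of a linear rescan.
import Mathlib
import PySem

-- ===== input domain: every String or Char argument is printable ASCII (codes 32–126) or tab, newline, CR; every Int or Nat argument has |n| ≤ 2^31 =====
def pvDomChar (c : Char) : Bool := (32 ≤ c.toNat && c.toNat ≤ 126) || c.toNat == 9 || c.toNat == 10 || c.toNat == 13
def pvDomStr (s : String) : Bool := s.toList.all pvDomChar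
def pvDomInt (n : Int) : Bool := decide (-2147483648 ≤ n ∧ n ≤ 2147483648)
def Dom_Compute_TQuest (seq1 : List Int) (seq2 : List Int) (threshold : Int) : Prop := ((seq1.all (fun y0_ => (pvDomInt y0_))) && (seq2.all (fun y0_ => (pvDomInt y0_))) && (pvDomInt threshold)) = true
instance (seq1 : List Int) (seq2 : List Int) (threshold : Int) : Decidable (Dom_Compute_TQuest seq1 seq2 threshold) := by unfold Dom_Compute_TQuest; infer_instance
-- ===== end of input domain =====

-- B replaces A's per-index rescan of the seq2 window by a sorted sliding window
-- queried with bisect (objective: faster; same return value, no mutation of the arguments).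

-- ===== PORT A =====
-- loop body of A's 'for i in range(len1)'; 'round(tquest_count, 3)' on an int returns it unchanged
def aStep (seq1 seq2 : List Int) (threshold : Int) (tquest_count : Int) (i : Nat) : Int :=
  let len2 : Int := seq2.length
  let start_index : Int := max 0 ((i : Int) - len2 + 1)
  let end_index : Int := min ((i : Int) + 1) len2
  if (PySem.List.pyRange start_index end_index 1).any (fun j =>
      match PySem.List.pyGet? seq1 (i : Int), PySem.List.pyGet? seq2 j with
      | some a, some b => decide (|a - b| ≤ threshold)
      | _, _ => false)
  then tquest_count + 1 else tquest_count

def Compute_TQuest (seq1 : List Int) (seq2 : List Int) (threshold : Int) : Int :=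
  (List.range seq1.length).foldl (aStep seq1 seq2 threshold) 0

-- ===== PORT B =====
-- bisect.bisect_left on a sorted list: insertion point = number of elements < x
def bisectLeft : List Int → Int → Nat
  | [], _ => 0
  | y :: ys, x => if y < x then bisectLeft ys x + 1 else 0

-- 'if i < len2: bisect.insort(win, seq2[i])'  (insort ported as orderedInsert:
-- on Int values the resulting sorted list is identical)
def tqPush (seq2 : List Int) (win : List Int) (i : Nat) : List Int :=
  if i < seq2.length then win.orderedInsert (· ≤ ·) (seq2.getD i 0) else win

-- 'if len2 <= i and win: del win[bisect.bisect_left(win, seq2[i - len2])]'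
def tqPop (seq2 : List Int) (win : List Int) (i : Nat) : List Int :=
  if seq2.length ≤ i ∧ win ≠ [] then
    win.eraseIdx (bisectLeft win (seq2.getD (i - seq2.length) 0))
  else win

-- loop body of B's 'for i in range(len(seq1))'
def tqStep (seq1 seq2 : List Int) (threshold : Int) (st : List Int × Int) (i : Nat) : List Int × Int :=
  let v := seq1.getD i 0
  let win := tqPop seq2 (tqPush seq2 st.1 i) i
  let lo := bisectLeft win (v - threshold)
  (win, if lo < win.length ∧ win.getD lo 0 ≤ v + threshold then st.2 + 1 else st.2)

def Compute_TQuest_alt (seq1 : List Int) (seq2 : List Int) (threshold : Int) : Int :=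
  ((List.range seq1.length).foldl (tqStep seq1 seq2 threshold) ([], 0)).2

-- ===== PRECONDITION & SPEC =====
def Spec_Compute_TQuest (seq1 : List Int) (seq2 : List Int) (threshold : Int) (out : Int) : Prop := out = Compute_TQuest_alt seq1 seq2 threshold
instance (seq1 : List Int) (seq2 : List Int) (threshold : Int) (out : Int) : Decidable (Spec_Compute_TQuest seq1 seq2 threshold out) := by unfold Spec_Compute_TQuest; infer_instance

-- ===== CLAIM (what is proved, stated in full; the proofs are below) =====
def Claim_equal_Compute_TQuest : Prop := ∀ (seq1 : List Int) (seq2 : List Int) (threshold : Int), Dom_Compute_TQuest seq1 seq2 threshold → Spec_Compute_TQuest seq1 seq2 threshold (Compute_TQuest seq1 seq2 threshold)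

-- ===== LEMMAS AND PROOFS =====

-- the window of seq2 elements seen after k outer steps: indices [k - len2, min k len2)
def tqWin (seq2 : List Int) (k : Nat) : List Int :=
  (seq2.take k).drop (k - seq2.length)

lemma tqWin_zero (seq2 : List Int) : tqWin seq2 0 = [] := by
  simp [tqWin]

lemma tqWin_succ_lt (seq2 : List Int) (i : Nat) (h : i < seq2.length) :
    tqWin seq2 (i + 1) = tqWin seq2 i ++ [seq2.getD i 0] := by
  unfold tqWin
  have h1 : i + 1 - seq2.length = 0 := by omega
  have h2 : i - seq2.length = 0 := by omega
  rw [h1, h2, List.drop_zero, List.drop_zero, List.take_add_one]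
  rw [List.getElem?_eq_getElem h, List.getD_eq_getElem seq2 0 h]
  rfl

lemma tqWin_succ_ge (seq2 : List Int) (i : Nat) (h : seq2.length ≤ i) :
    tqWin seq2 (i + 1) = (tqWin seq2 i).tail := by
  unfold tqWin
  rw [List.take_of_length_le (by omega), List.take_of_length_le h]
  have h3 : i + 1 - seq2.length = (i - seq2.length) + 1 := by omega
  rw [h3, ← List.tail_drop]

lemma tqWin_drop (seq2 : List Int) (i : Nat) (h : seq2.length ≤ i) :
    tqWin seq2 i = seq2.drop (i - seq2.length) := by
  unfold tqWin
  rw [List.take_of_length_le h]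

lemma tqWin_cons_ge (seq2 : List Int) (i : Nat) (h : seq2.length ≤ i) (hne : tqWin seq2 i ≠ []) :
    tqWin seq2 i = seq2.getD (i - seq2.length) 0 :: tqWin seq2 (i + 1) := by
  have hlt : i - seq2.length < seq2.length := by
    by_contra hc
    exact hne ((tqWin_drop seq2 i h).trans (List.drop_eq_nil_of_le (by omega)))
  rw [tqWin_succ_ge seq2 i h, tqWin_drop seq2 i h, List.drop_eq_getElem_cons hlt,
    List.getD_eq_getElem seq2 0 hlt]
  rfl

lemma mem_tqWin {seq2 : List Int} {k : Nat} {x : Int} :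
    x ∈ tqWin seq2 k ↔ ∃ j : Nat, k - seq2.length ≤ j ∧ j < min k seq2.length ∧ seq2.getD j 0 = x := by
  unfold tqWin
  rw [List.mem_iff_getElem]
  constructor
  · rintro ⟨idx, hidx, rfl⟩
    have hlen := hidx
    simp only [List.length_drop, List.length_take] at hlen
    refine ⟨k - seq2.length + idx, by omega, by omega, ?_⟩
    simp only [List.getElem_drop, List.getElem_take]
    exact List.getD_eq_getElem seq2 0 (by omega)
  · rintro ⟨j, hj1, hj2, rfl⟩
    refine ⟨j - (k - seq2.length), by simp only [List.length_drop, List.length_take]; omega, ?_⟩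
    have hidx : k - seq2.length + (j - (k - seq2.length)) = j := by omega
    simp only [List.getElem_drop, List.getElem_take, hidx]
    exact (List.getD_eq_getElem seq2 0 (by omega)).symm

lemma bisect_query {win : List Int} (hs : win.Pairwise (· ≤ ·)) (a b : Int) :
    (bisectLeft win a < win.length ∧ win.getD (bisectLeft win a) 0 ≤ b) ↔ ∃ x ∈ win, a ≤ x ∧ x ≤ b := by
  induction win with
  | nil => simp [bisectLeft]
  | cons y ys ih =>
    rw [List.pairwise_cons] at hs
    by_cases hy : y < a
    · have hih := ih hs.2
      simp only [bisectLeft, if_pos hy, List.length_cons, List.getD_cons_succ,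
        Nat.add_lt_add_iff_right, hih, List.mem_cons]
      constructor
      · rintro ⟨x, hx, h1, h2⟩; exact ⟨x, Or.inr hx, h1, h2⟩
      · rintro ⟨x, hx, h1, h2⟩
        rcases hx with rfl | hx
        · omega
        · exact ⟨x, hx, h1, h2⟩
    · simp only [bisectLeft, if_neg hy, List.length_cons, List.getD_cons_zero, List.mem_cons]
      constructor
      · rintro ⟨-, hyb⟩; exact ⟨y, Or.inl rfl, by omega, hyb⟩
      · rintro ⟨x, hx, h1, h2⟩
        rcases hx with rfl | hx
        · exact ⟨by omega, h2⟩
        · have := hs.1 x hx; exact ⟨by omega, by omega⟩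

lemma eraseIdx_bisectLeft {win : List Int} (hs : win.Pairwise (· ≤ ·)) {x : Int} (hx : x ∈ win) :
    win.eraseIdx (bisectLeft win x) = win.erase x := by
  induction win with
  | nil => cases hx
  | cons y ys ih =>
    rw [List.pairwise_cons] at hs
    by_cases hy : y < x
    · have hne : y ≠ x := by omega
      have hx' : x ∈ ys := by
        rcases List.mem_cons.mp hx with rfl | h
        · omega
        · exact h
      simp only [bisectLeft, if_pos hy, List.eraseIdx_cons_succ, List.erase_cons,
        beq_iff_eq, if_neg hne, ih hs.2 hx']
    · have hxy : y = x := by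
        rcases List.mem_cons.mp hx with rfl | h
        · rfl
        · have := hs.1 x h; omega
      simp [bisectLeft, hxy]

lemma aAny_iff (seq1 seq2 : List Int) (t : Int) (k : Nat) (hk : k < seq1.length) :
    ((PySem.List.pyRange (max 0 ((k : Int) - (seq2.length : Int) + 1)) (min ((k : Int) + 1) (seq2.length : Int)) 1).any (fun j =>
      match PySem.List.pyGet? seq1 (k : Int), PySem.List.pyGet? seq2 j with
      | some a, some b => decide (|a - b| ≤ t)
      | _, _ => false) = true)
    ↔ ∃ x ∈ tqWin seq2 (k + 1), seq1.getD k 0 - t ≤ x ∧ x ≤ seq1.getD k 0 + t := by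
  have hget1 : PySem.List.pyGet? seq1 (k : Int) = some (seq1.getD k 0) := by
    rw [PySem.List.pyGet?_natCast, List.getElem?_eq_getElem hk, List.getD_eq_getElem seq1 0 hk]
  rw [List.any_eq_true]
  simp only [PySem.List.mem_pyRange_one, hget1]
  constructor
  · rintro ⟨j, ⟨hj1, hj2⟩, hf⟩
    have hj0 : 0 ≤ j := le_trans (le_max_left 0 _) hj1
    have hjm : j < (seq2.length : Int) := lt_of_lt_of_le hj2 (min_le_right _ _)
    have hjn : j.toNat < seq2.length := by omega
    have hget2 : PySem.List.pyGet? seq2 j = some (seq2.getD j.toNat 0) := by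
      rw [PySem.List.pyGet?_of_nonneg seq2 hj0, List.getElem?_eq_getElem hjn,
        List.getD_eq_getElem seq2 0 hjn]
    rw [hget2] at hf
    simp only [decide_eq_true_eq] at hf
    rw [abs_sub_le_iff] at hf
    refine ⟨seq2.getD j.toNat 0, ?_, by omega, by omega⟩
    rw [mem_tqWin]
    exact ⟨j.toNat, by omega, by omega, rfl⟩
  · rintro ⟨x, hx, h1, h2⟩
    rw [mem_tqWin] at hx
    obtain ⟨jn, hj1, hj2, rfl⟩ := hx
    refine ⟨(jn : Int), ⟨by omega, by omega⟩, ?_⟩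
    have hjn : jn < seq2.length := by omega
    have hget2 : PySem.List.pyGet? seq2 (jn : Int) = some (seq2.getD jn 0) := by
      rw [PySem.List.pyGet?_natCast, List.getElem?_eq_getElem hjn]
      exact congrArg some (List.getD_eq_getElem seq2 0 hjn).symm
    rw [hget2]
    simp only [decide_eq_true_eq]
    rw [abs_sub_le_iff]
    constructor <;> omega

lemma tqStep_fst (seq1 seq2 : List Int) (t : Int) (st : List Int × Int) (i : Nat) :
    (tqStep seq1 seq2 t st i).1 = tqPop seq2 (tqPush seq2 st.1 i) i := rfl

lemma tqStep_snd (seq1 seq2 : List Int) (t : Int) (st : List Int × Int) (i : Nat) :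
    (tqStep seq1 seq2 t st i).2 =
      (if bisectLeft (tqPop seq2 (tqPush seq2 st.1 i) i) (seq1.getD i 0 - t) <
            (tqPop seq2 (tqPush seq2 st.1 i) i).length ∧
          (tqPop seq2 (tqPush seq2 st.1 i) i).getD
            (bisectLeft (tqPop seq2 (tqPush seq2 st.1 i) i) (seq1.getD i 0 - t)) 0 ≤
            seq1.getD i 0 + t
        then st.2 + 1 else st.2) := rfl

lemma tqWin_step (seq2 : List Int) (win : List Int) (k : Nat)
    (hsort : win.Pairwise (· ≤ ·)) (hperm : win.Perm (tqWin seq2 k)) :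
    (tqPop seq2 (tqPush seq2 win k) k).Pairwise (· ≤ ·) ∧
    (tqPop seq2 (tqPush seq2 win k) k).Perm (tqWin seq2 (k + 1)) := by
  by_cases hkm : k < seq2.length
  · rw [tqPush, if_pos hkm, tqPop, if_neg (fun h => absurd h.1 (by omega))]
    refine ⟨List.Pairwise.orderedInsert _ _ hsort, ?_⟩
    rw [tqWin_succ_lt seq2 k hkm]
    exact ((List.perm_orderedInsert _ _ _).trans (hperm.cons _)).trans
      (List.perm_append_singleton _ _).symm
  · have hge : seq2.length ≤ k := by omega
    rw [tqPush, if_neg hkm]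
    by_cases hne : win = []
    · rw [tqPop, if_neg (fun h => h.2 hne)]
      have hwk : tqWin seq2 k = [] :=
        List.eq_nil_of_length_eq_zero (by rw [← hperm.length_eq, hne]; rfl)
      refine ⟨hsort, ?_⟩
      rw [tqWin_succ_ge seq2 k hge, hwk, hne]
      exact List.Perm.refl _
    · rw [tqPop, if_pos ⟨hge, hne⟩]
      have hwne : tqWin seq2 k ≠ [] := fun hcon =>
        hne (List.eq_nil_of_length_eq_zero (by rw [hperm.length_eq, hcon]; rfl))
      have hcons := tqWin_cons_ge seq2 k hge hwne
      have hxmem : seq2.getD (k - seq2.length) 0 ∈ win := by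
        rw [hperm.mem_iff, hcons]; exact List.mem_cons_self
      rw [eraseIdx_bisectLeft hsort hxmem]
      refine ⟨List.Pairwise.sublist (List.erase_sublist) hsort, ?_⟩
      have hp := hperm.erase (seq2.getD (k - seq2.length) 0)
      rw [hcons, List.erase_cons_head] at hp
      exact hp

lemma tqCount_step (seq1 seq2 : List Int) (t : Int) (c : Int) (k : Nat) (hk : k < seq1.length)
    (win2 : List Int) (hs2 : win2.Pairwise (· ≤ ·)) (hp2 : win2.Perm (tqWin seq2 (k + 1))) :
    (if bisectLeft win2 (seq1.getD k 0 - t) < win2.length ∧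
        win2.getD (bisectLeft win2 (seq1.getD k 0 - t)) 0 ≤ seq1.getD k 0 + t
      then c + 1 else c) = aStep seq1 seq2 t c k := by
  simp only [aStep]
  refine if_congr ?_ rfl rfl
  refine (bisect_query hs2 _ _).trans (Iff.trans ?_ (aAny_iff seq1 seq2 t k hk).symm)
  exact ⟨fun ⟨x, hx, h⟩ => ⟨x, hp2.subset hx, h⟩, fun ⟨x, hx, h⟩ => ⟨x, hp2.symm.subset hx, h⟩⟩

lemma tq_inv (seq1 seq2 : List Int) (t : Int) (k : Nat) (hk : k ≤ seq1.length) :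
    ((List.range k).foldl (tqStep seq1 seq2 t) ([], 0)).1.Pairwise (· ≤ ·) ∧
    ((List.range k).foldl (tqStep seq1 seq2 t) ([], 0)).1.Perm (tqWin seq2 k) ∧
    ((List.range k).foldl (tqStep seq1 seq2 t) ([], 0)).2 = (List.range k).foldl (aStep seq1 seq2 t) 0 := by
  induction k with
  | zero =>
    refine ⟨List.Pairwise.nil, ?_, rfl⟩
    simp [tqWin_zero]
  | succ k ih =>
    obtain ⟨hsort, hperm, hcount⟩ := ih (by omega)
    rw [List.range_succ, List.foldl_append, List.foldl_append]
    simp only [List.foldl_cons, List.foldl_nil]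
    obtain ⟨hs2, hp2⟩ :=
      tqWin_step seq2 ((List.range k).foldl (tqStep seq1 seq2 t) ([], 0)).1 k hsort hperm
    refine ⟨by rw [tqStep_fst]; exact hs2, by rw [tqStep_fst]; exact hp2, ?_⟩
    rw [tqStep_snd, hcount]
    exact tqCount_step seq1 seq2 t _ k (by omega) _ hs2 hp2

-- ===== VERDICT (by name: the statement is the Claim_ definition above) =====
theorem Compute_TQuest_spec : Claim_equal_Compute_TQuest := by
  intro seq1 seq2 threshold _
  unfold Spec_Compute_TQuest Compute_TQuest Compute_TQuest_alt
  exact (tq_inv seq1 seq2 threshold seq1.length le_rfl).2.2.symm
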